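-- pv_equiv track=rewrite | github.com/Annie750/ACC45DAYSOFCODE-2024. | Day 10 WGHTS.py | can_measure_weight
-- ===== SOURCE A (Python) =====
-- def can_measure_weight(test_cases):
--     results = []
--     for W, X, Y, Z in test_cases:
--         if (W == X or W == Y or W == Z or
--             W == (X + Y) or W == (X + Z) or W == (Y + Z) or
--             W == (X + Y + Z)):
--             results.append("YES")
--         else:
--             results.append("NO")
--     return results
-- ===== SOURCE B (Python) =====
-- def can_measure_weight(test_cases):
--     results = []
--     for W, X, Y, Z in test_cases:
--         reachable = set()
--         for w in (X, Y, Z):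
--             reachable = reachable | {s + w for s in reachable} | {w}
--         results.append("YES" if W in reachable else "NO")
--     return results
-- ===== Notes on version B (the rewrite author's own statement) =====
-- stated objective: idiomatic
-- what changed: Replaces A's hardcoded 7-way boolean disjunction with a subset-sum dynamic programming pass: fold over the three weights growing the set of non-empty subset sums, then a single membership test.
import Mathlib
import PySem

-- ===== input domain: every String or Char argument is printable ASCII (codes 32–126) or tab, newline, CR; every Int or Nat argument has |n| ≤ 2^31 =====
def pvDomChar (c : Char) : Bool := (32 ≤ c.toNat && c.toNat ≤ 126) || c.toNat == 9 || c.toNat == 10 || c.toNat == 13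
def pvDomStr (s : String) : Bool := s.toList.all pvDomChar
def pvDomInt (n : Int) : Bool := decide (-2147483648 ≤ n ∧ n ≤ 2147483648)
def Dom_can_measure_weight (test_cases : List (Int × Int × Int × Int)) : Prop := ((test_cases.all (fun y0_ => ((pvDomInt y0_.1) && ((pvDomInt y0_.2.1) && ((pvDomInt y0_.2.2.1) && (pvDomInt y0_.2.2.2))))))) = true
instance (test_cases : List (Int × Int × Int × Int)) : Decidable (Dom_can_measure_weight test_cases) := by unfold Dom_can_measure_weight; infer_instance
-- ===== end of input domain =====

-- B replaces A's hardcoded 7-way disjunction with a fold growing the set of non-empty subset sums of the three weights, then a membership test (objective: idiomatic).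


-- ===== PORT A =====
-- literal transliteration of A: hardcoded 7-way disjunction per test case
def can_measure_weight (test_cases : List (Int × Int × Int × Int)) : List String :=
  test_cases.foldl (fun results t =>
    let W := t.1; let X := t.2.1; let Y := t.2.2.1; let Z := t.2.2.2
    if W = X ∨ W = Y ∨ W = Z ∨ W = X + Y ∨ W = X + Z ∨ W = Y + Z ∨ W = X + Y + Z then
      results ++ ["YES"]
    else
      results ++ ["NO"]) []

-- ===== PORT B =====
-- B: grow the set of non-empty subset sums over the three weights, then test membership
def pvReach (ws : List Int) : PySem.Set Int :=
  ws.foldl (fun reachable w =>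
    PySem.Set.union (PySem.Set.union reachable
      (PySem.Set.ofList (reachable.map (fun s => s + w)))) (PySem.Set.ofList [w]))
    PySem.Set.empty

def can_measure_weight_alt (test_cases : List (Int × Int × Int × Int)) : List String :=
  test_cases.foldl (fun results t =>
    let W := t.1; let X := t.2.1; let Y := t.2.2.1; let Z := t.2.2.2
    results ++ [if W ∈ pvReach [X, Y, Z] then "YES" else "NO"]) []

-- ===== PRECONDITION & SPEC =====
def Spec_can_measure_weight (test_cases : List (Int × Int × Int × Int)) (out : List String) : Prop := out = can_measure_weight_alt test_cases
instance (test_cases : List (Int × Int × Int × Int)) (out : List String) : Decidable (Spec_can_measure_weight test_cases out) := by unfold Spec_can_measure_weight; infer_instance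

-- ===== CLAIM (what is proved, stated in full; the proofs are below) =====
def Claim_equal_can_measure_weight : Prop := ∀ (test_cases : List (Int × Int × Int × Int)), Dom_can_measure_weight test_cases → Spec_can_measure_weight test_cases (can_measure_weight test_cases)

-- ===== LEMMAS AND PROOFS =====
theorem mem_pvReach3 (W X Y Z : Int) :
    W ∈ pvReach [X, Y, Z] ↔
      (W = X ∨ W = Y ∨ W = Z ∨ W = X + Y ∨ W = X + Z ∨ W = Y + Z ∨ W = X + Y + Z) := by
  simp [pvReach, PySem.Set.mem_union, PySem.Set.mem_ofList, List.mem_map, PySem.Set.empty]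
  constructor
  · rintro (((h | h) | h | ⟨a, ha, h2⟩) | h) <;> try omega
  · rintro (h | h | h | h | h | h | h)
    · exact Or.inl (Or.inl (Or.inl (Or.inl h)))
    · exact Or.inl (Or.inl (Or.inr h))
    · exact Or.inr h
    · exact Or.inl (Or.inl (Or.inl (Or.inr h.symm)))
    · exact Or.inl (Or.inr ⟨X, Or.inl (Or.inl rfl), h.symm⟩)
    · exact Or.inl (Or.inr ⟨Y, Or.inr rfl, h.symm⟩)
    · exact Or.inl (Or.inr ⟨X + Y, Or.inl (Or.inr rfl), by omega⟩)

theorem foldl_eq (l : List (Int × Int × Int × Int)) (acc : List String) :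
    l.foldl (fun results t =>
      let W := t.1; let X := t.2.1; let Y := t.2.2.1; let Z := t.2.2.2
      if W = X ∨ W = Y ∨ W = Z ∨ W = X + Y ∨ W = X + Z ∨ W = Y + Z ∨ W = X + Y + Z then
        results ++ ["YES"]
      else
        results ++ ["NO"]) acc
    = l.foldl (fun results t =>
      let W := t.1; let X := t.2.1; let Y := t.2.2.1; let Z := t.2.2.2
      results ++ [if W ∈ pvReach [X, Y, Z] then "YES" else "NO"]) acc := by
  induction l generalizing acc with
  | nil => rfl
  | cons t ts ih =>
    simp only [List.foldl_cons]
    rw [ih]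
    congr 1
    by_cases h : t.1 = t.2.1 ∨ t.1 = t.2.2.1 ∨ t.1 = t.2.2.2 ∨ t.1 = t.2.1 + t.2.2.1 ∨
        t.1 = t.2.1 + t.2.2.2 ∨ t.1 = t.2.2.1 + t.2.2.2 ∨ t.1 = t.2.1 + t.2.2.1 + t.2.2.2 <;>
      simp [h, (mem_pvReach3 t.1 t.2.1 t.2.2.1 t.2.2.2)]

-- ===== VERDICT (by name: the statement is the Claim_ definition above) =====
theorem can_measure_weight_spec : Claim_equal_can_measure_weight := by
  intro tc _
  unfold Spec_can_measure_weight can_measure_weight can_measure_weight_alt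
  exact foldl_eq tc []
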